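-- pv_equiv track=rewrite | github.com/SamCallister/book-game | src/python/main.py | get_unique_words
-- ===== SOURCE A (Python) =====
-- def get_unique_words(words_per_book, correct_answer_index):
--     correct_words = words_per_book[correct_answer_index]
--
--     other_sets = set(
--         [
--             word
--             for i, words in enumerate(words_per_book)
--             for word in words
--             if i != correct_answer_index
--         ]
--     )
--
--     return set(correct_words) - other_sets
-- ===== SOURCE B (Python) =====
-- def get_unique_words(words_per_book, correct_answer_index):
--     correct_words = words_per_book[correct_answer_index]  # keep A's IndexError on a bad index
--
--     index = {}
--     for i, words in enumerate(words_per_book):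
--         for word in words:
--             index.setdefault(word, set()).add(i)
--
--     return {word for word, books in index.items() if books == {correct_answer_index}}
-- ===== Notes on version B (the rewrite author's own statement) =====
-- stated objective: alternative
-- what changed: Replaces A's union-all-other-books-then-subtract with an inverted index built in one pass (word -> set of book positions) followed by a selection of the words whose position set is exactly {correct_answer_index}.
import Mathlib
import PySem

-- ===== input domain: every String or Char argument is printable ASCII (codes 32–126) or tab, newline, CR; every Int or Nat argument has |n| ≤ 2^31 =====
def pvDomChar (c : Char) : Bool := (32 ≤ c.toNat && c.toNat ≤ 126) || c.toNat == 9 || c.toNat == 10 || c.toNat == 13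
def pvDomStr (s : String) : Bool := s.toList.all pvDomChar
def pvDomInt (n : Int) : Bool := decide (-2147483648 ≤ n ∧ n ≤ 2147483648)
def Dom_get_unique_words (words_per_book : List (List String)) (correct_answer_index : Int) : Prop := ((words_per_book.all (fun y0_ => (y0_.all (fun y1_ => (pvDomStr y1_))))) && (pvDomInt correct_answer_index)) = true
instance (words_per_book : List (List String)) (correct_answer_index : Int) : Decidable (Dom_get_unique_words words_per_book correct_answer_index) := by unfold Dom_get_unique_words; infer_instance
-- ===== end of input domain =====

-- B replaces A's "union the other books, then subtract" with an inverted index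
-- (word -> set of book positions) plus a selection pass; alternative decomposition, same cost.

-- ===== PORT A =====
def get_unique_words (words_per_book : List (List String)) (correct_answer_index : Int) : List String :=
  match PySem.List.pyGet? words_per_book correct_answer_index with
  | none => []  -- IndexError (excluded by Pre_)
  | some correct_words =>
    let other_sets : PySem.Set String :=
      PySem.Set.ofList
        (((PySem.List.enumerate words_per_book).filter
            (fun p => p.1 != correct_answer_index)).flatMap (fun p => p.2))
    PySem.Set.diff (PySem.Set.ofList correct_words) other_sets

-- ===== PORT B =====
def get_unique_words_alt (words_per_book : List (List String)) (correct_answer_index : Int) : List String :=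
  match PySem.List.pyGet? words_per_book correct_answer_index with
  | none => []  -- IndexError (excluded by Pre_)
  | some _correct_words =>
    let index : PySem.Dict String (PySem.Set Int) :=
      (PySem.List.enumerate words_per_book).foldl
        (fun d p => p.2.foldl
            (fun d word => PySem.Dict.modify d word PySem.Set.empty (fun s => PySem.Set.add s p.1)) d)
        PySem.Dict.empty
    PySem.Set.ofList
      ((index.items.filter
          (fun q => PySem.Set.equal q.2 (PySem.Set.ofList [correct_answer_index]))).map (fun q => q.1))

-- ===== PRECONDITION & SPEC =====
-- Pre_ excludes exactly the inputs where Python A raises IndexError (index out of range).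
def Pre_get_unique_words (words_per_book : List (List String)) (correct_answer_index : Int) : Prop :=
  PySem.Raise.InRange words_per_book.length correct_answer_index
instance (words_per_book : List (List String)) (correct_answer_index : Int) : Decidable (Pre_get_unique_words words_per_book correct_answer_index) := by unfold Pre_get_unique_words; infer_instance
def pvWitness_get_unique_words : List (List String) × Int := ([["a", "b"], ["b"]], 0)

def Spec_get_unique_words (words_per_book : List (List String)) (correct_answer_index : Int) (out : List String) : Prop := out = get_unique_words_alt words_per_book correct_answer_index
instance (words_per_book : List (List String)) (correct_answer_index : Int) (out : List String) : Decidable (Spec_get_unique_words words_per_book correct_answer_index out) := by unfold Spec_get_unique_words; infer_instance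

-- ===== CLAIM (what is proved, stated in full; the proofs are below) =====
def Claim_equal_get_unique_words : Prop := ∀ (words_per_book : List (List String)) (correct_answer_index : Int), Dom_get_unique_words words_per_book correct_answer_index → Pre_get_unique_words words_per_book correct_answer_index → Spec_get_unique_words words_per_book correct_answer_index (get_unique_words words_per_book correct_answer_index)

-- ===== LEMMAS AND PROOFS =====

-- Proof-side views of B's inverted-index loop.
def pvBook (i : Int) (ws : List String) (d : PySem.Dict String (PySem.Set Int)) :
    PySem.Dict String (PySem.Set Int) :=
  ws.foldl (fun d word => PySem.Dict.modify d word PySem.Set.empty (fun s => PySem.Set.add s i)) d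

def pvIndex (L : List (Int × List String)) : PySem.Dict String (PySem.Set Int) :=
  L.foldl (fun d p => pvBook p.1 p.2 d) PySem.Dict.empty

def pvBooks (L : List (Int × List String)) (w : String) : List Int :=
  (L.filter (fun p => p.2.contains w)).map Prod.fst

theorem pv_add_add (s : PySem.Set Int) (i : Int) :
    PySem.Set.add (PySem.Set.add s i) i = PySem.Set.add s i :=
  PySem.Set.add_of_mem (by simp [PySem.Set.mem_add])

theorem pv_get?_pvBook (ws : List String) (d : PySem.Dict String (PySem.Set Int)) (i : Int)
    (w : String) :
    (pvBook i ws d).get? w =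
      if w ∈ ws then some (PySem.Set.add (d.getD w PySem.Set.empty) i) else d.get? w := by
  induction ws generalizing d with
  | nil => simp [pvBook]
  | cons v rest ih =>
    rw [show pvBook i (v :: rest) d =
        pvBook i rest (d.modify v PySem.Set.empty fun s => s.add i) from rfl, ih]
    have hmod : (d.modify v PySem.Set.empty fun s => s.add i) =
        d.insert v ((d.getD v PySem.Set.empty).add i) := rfl
    by_cases hw : w = v
    · subst hw
      by_cases hr : w ∈ rest
      · rw [if_pos hr, if_pos (List.mem_cons_self),
          PySem.Dict.getD_modify_self d w PySem.Set.empty, pv_add_add]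
      · rw [if_neg hr, if_pos (List.mem_cons_self), hmod,
          PySem.Dict.get?_insert_self]
    · have hmem : (w ∈ v :: rest) ↔ w ∈ rest := by simp [hw]
      by_cases hr : w ∈ rest
      · rw [if_pos hr, if_pos (hmem.mpr hr),
          PySem.Dict.getD_modify_of_ne d PySem.Set.empty _ hw]
      · rw [if_neg hr, if_neg (fun h => hr (hmem.mp h)), hmod,
          PySem.Dict.get?_insert_of_ne d _ hw]

theorem pv_keys_pvBook (ws : List String) (d : PySem.Dict String (PySem.Set Int)) (i : Int) :
    (pvBook i ws d).keys = PySem.Set.update d.keys ws := by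
  induction ws generalizing d with
  | nil => simp [pvBook, PySem.Set.update_nil]
  | cons v rest ih =>
    rw [show pvBook i (v :: rest) d =
        pvBook i rest (d.modify v PySem.Set.empty fun s => s.add i) from rfl, ih,
      PySem.Set.update_cons]
    congr 1
    rw [PySem.Dict.keys_modify]
    by_cases h : v ∈ d.keys
    · rw [PySem.Dict.keys_insert_of_contains d _
        ((PySem.Dict.contains_iff_mem_keys d v).mpr h), PySem.Set.add_of_mem h]
    · have hc : d.contains v = false := by
        cases hcc : d.contains v
        · rfl
        · exact absurd ((PySem.Dict.contains_iff_mem_keys d v).mp hcc) h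
      rw [PySem.Dict.keys_insert_of_not_contains d _ hc, PySem.Set.add_of_not_mem h]

theorem pv_pvBooks_nil_of_not_mem (L : List (Int × List String)) (w : String)
    (h : w ∉ L.flatMap (fun p => p.2)) : pvBooks L w = [] := by
  have hf : List.filter (fun p => p.2.contains w) L = [] := by
    rw [List.filter_eq_nil_iff]
    intro p hp hc
    exact h (List.mem_flatMap.mpr ⟨p, hp, by simpa using hc⟩)
  have hdef : pvBooks L w = (List.filter (fun p => p.2.contains w) L).map Prod.fst := rfl
  rw [hdef, hf]
  rfl

theorem pv_get?_pvIndex (L : List (Int × List String)) (w : String) :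
    (pvIndex L).get? w =
      if w ∈ L.flatMap (fun p => p.2) then some (PySem.Set.ofList (pvBooks L w)) else none := by
  induction L using List.reverseRecOn with
  | nil => simp [pvIndex, PySem.Dict.get?_empty]
  | append_singleton L p ih =>
    have hstep : pvIndex (L ++ [p]) = pvBook p.1 p.2 (pvIndex L) := by
      simp [pvIndex, List.foldl_append]
    have hbooks : pvBooks (L ++ [p]) w =
        pvBooks L w ++ (if p.2.contains w then [p.1] else []) := by
      simp [pvBooks, List.filter_append, List.filter_cons]
      split <;> simp
    rw [hstep, pv_get?_pvBook, hbooks]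
    by_cases h1 : w ∈ p.2
    · have h1' : p.2.contains w = true := by simpa using h1
      by_cases h2 : w ∈ L.flatMap (fun p => p.2)
      · have hD : (pvIndex L).getD w ([] : PySem.Set Int) = PySem.Set.ofList (pvBooks L w) :=
          PySem.Dict.getD_of_get?_eq_some _ _ (by rw [ih]; simp [h2])
        simp [h1, h2, hD, PySem.Set.ofList_append_singleton]
      · have hD : (pvIndex L).getD w ([] : PySem.Set Int) = ([] : PySem.Set Int) :=
          PySem.Dict.getD_of_get?_eq_none _ _ (by rw [ih]; simp [h2])
        have hnil : pvBooks L w = [] := pv_pvBooks_nil_of_not_mem L w h2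
        rw [PySem.Set.ofList_eq_self_of_nodup _ (by simp [hnil]; split <;> simp)]
        simp [h1, h2, hD, hnil]
    · have h1' : p.2.contains w = false := by simpa using h1
      by_cases h2 : w ∈ L.flatMap (fun p => p.2) <;>
        simp [h1, h2, ih]

theorem pv_keys_pvIndex (L : List (Int × List String)) :
    (pvIndex L).keys = PySem.Set.ofList (L.flatMap (fun p => p.2)) := by
  induction L using List.reverseRecOn with
  | nil => simp [pvIndex, PySem.Dict.keys_empty]
  | append_singleton L p ih =>
    have hstep : pvIndex (L ++ [p]) = pvBook p.1 p.2 (pvIndex L) := by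
      simp [pvIndex, List.foldl_append]
    rw [hstep, pv_keys_pvBook, ih, ← PySem.Set.ofList_append]
    simp

theorem pv_items_eq_map_keys {κ ν : Type} [BEq κ] [LawfulBEq κ]
    (d : PySem.Dict κ ν) (h : d.keys.Nodup) (d0 : ν) :
    d.items = d.keys.map (fun k => (k, d.getD k d0)) := by
  have hkeys : d.keys = d.items.map Prod.fst := rfl
  rw [hkeys, List.map_map]
  have hcongr : ∀ q ∈ d.items, ((fun k => (k, d.getD k d0)) ∘ Prod.fst) q = q := by
    intro q hq
    have : d.getD q.1 d0 = q.2 := PySem.Dict.getD_of_mem_items d (by simpa using hq) h d0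
    simp [this]
  rw [List.map_congr_left hcongr]
  simp

theorem pv_filter_ofList_append_left {α : Type} [BEq α] [LawfulBEq α]
    (xs ys : List α) (R : α → Bool) (h : ∀ a ∈ xs, R a = false) :
    (PySem.Set.ofList (xs ++ ys)).filter R = (PySem.Set.ofList ys).filter R := by
  rw [PySem.Set.ofList_append, PySem.Set.update_eq_append_filter, List.filter_append]
  have h1 : (PySem.Set.ofList xs).filter R = [] :=
    List.filter_eq_nil_iff.mpr
      (fun a ha => by simp [h a ((PySem.Set.mem_ofList xs a).mp ha)])
  rw [h1, List.nil_append, List.filter_filter]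
  apply List.filter_congr
  intro a ha
  by_cases hR : R a = true
  · have hax : a ∉ xs := fun hx => by simp [h a hx] at hR
    have hc : (PySem.Set.ofList xs).contains a = false := by
      cases hcc : (PySem.Set.ofList xs).contains a
      · rfl
      · exact absurd ((PySem.Set.mem_ofList xs a).mp
          ((PySem.Set.contains_iff _ _).mp hcc)) hax
    simp [hR]
    exact hax
  · simp [Bool.eq_false_iff.mpr hR]

theorem pv_filter_ofList_append_right {α : Type} [BEq α] [LawfulBEq α]
    (xs ys : List α) (R : α → Bool) (h : ∀ a ∈ ys, R a = false) :
    (PySem.Set.ofList (xs ++ ys)).filter R = (PySem.Set.ofList xs).filter R := by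
  rw [PySem.Set.ofList_append, PySem.Set.update_eq_append_filter, List.filter_append]
  have h2 : ((PySem.Set.ofList ys).filter
      (fun y => !(PySem.Set.contains (PySem.Set.ofList xs) y))).filter R = [] := by
    apply List.filter_eq_nil_iff.mpr
    intro a ha
    simp [h a ((PySem.Set.mem_ofList ys a).mp (List.mem_of_mem_filter ha))]
  rw [h2, List.append_nil]

theorem pv_a_eq (wpb : List (List String)) (ci : Int) (c : List String)
    (hg : PySem.List.pyGet? wpb ci = some c) :
    get_unique_words wpb ci =
      (PySem.Set.ofList c).filter (fun w =>
        !((PySem.Set.ofList (((PySem.List.enumerate wpb).filter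
            (fun p => p.1 != ci)).flatMap (fun p => p.2))).contains w)) := by
  simp only [get_unique_words, hg]
  rfl

theorem pv_alt_eq (wpb : List (List String)) (ci : Int) (c : List String)
    (hg : PySem.List.pyGet? wpb ci = some c) :
    get_unique_words_alt wpb ci =
      (PySem.Set.ofList wpb.flatten).filter
        (fun w => PySem.Set.equal (PySem.Set.ofList (pvBooks (PySem.List.enumerate wpb) w))
          (PySem.Set.ofList [ci])) := by
  simp only [get_unique_words_alt, hg]
  have hidx : ((PySem.List.enumerate wpb).foldl
      (fun d p => p.2.foldl
        (fun d word => PySem.Dict.modify d word PySem.Set.empty (fun s => PySem.Set.add s p.1)) d)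
      PySem.Dict.empty) = pvIndex (PySem.List.enumerate wpb) := rfl
  rw [hidx]
  have hflat : (PySem.List.enumerate wpb).flatMap (fun p => p.2) = wpb.flatten := by
    simp [List.flatMap, PySem.List.map_snd_enumerate]
  have hkeys : (pvIndex (PySem.List.enumerate wpb)).keys = PySem.Set.ofList wpb.flatten := by
    rw [pv_keys_pvIndex, hflat]
  have hnod : (pvIndex (PySem.List.enumerate wpb)).keys.Nodup := by
    rw [hkeys]; exact PySem.Set.nodup_ofList _
  rw [pv_items_eq_map_keys _ hnod PySem.Set.empty, List.filter_map, List.map_map]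
  have hid : ((fun q : String × PySem.Set Int => q.1) ∘
      (fun k => (k, (pvIndex (PySem.List.enumerate wpb)).getD k PySem.Set.empty))) = id := rfl
  rw [hid, List.map_id]
  have hpred : ∀ k ∈ (pvIndex (PySem.List.enumerate wpb)).keys,
      ((fun q : String × PySem.Set Int => PySem.Set.equal q.2 (PySem.Set.ofList [ci])) ∘
        (fun k => (k, (pvIndex (PySem.List.enumerate wpb)).getD k PySem.Set.empty))) k =
      (fun w => PySem.Set.equal (PySem.Set.ofList (pvBooks (PySem.List.enumerate wpb) w))
        (PySem.Set.ofList [ci])) k := by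
    intro k hk
    have hkmem : k ∈ (PySem.List.enumerate wpb).flatMap (fun p => p.2) := by
      rw [hflat]
      exact (PySem.Set.mem_ofList _ _).mp (hkeys ▸ hk)
    have hD : (pvIndex (PySem.List.enumerate wpb)).getD k ([] : PySem.Set Int) =
        PySem.Set.ofList (pvBooks (PySem.List.enumerate wpb) k) :=
      PySem.Dict.getD_of_get?_eq_some _ _ (by rw [pv_get?_pvIndex]; simp [hkmem])
    simp [hD]
  rw [List.filter_congr hpred, hkeys]
  exact PySem.Set.ofList_eq_self_of_nodup _
    ((PySem.Set.nodup_ofList wpb.flatten).filter _)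

theorem pv_mem_others (wpb : List (List String)) (ci : Int) (a : String) :
    (a ∈ ((PySem.List.enumerate wpb).filter (fun p => p.1 != ci)).flatMap (fun p => p.2)) ↔
      ∃ j : Nat, ∃ _ : j < wpb.length, ((j : Int) ≠ ci ∧ a ∈ wpb[j]) := by
  constructor
  · intro h
    obtain ⟨p, hp, ha⟩ := List.mem_flatMap.mp h
    obtain ⟨hpL, hpb⟩ := List.mem_filter.mp hp
    obtain ⟨j, hj, rfl⟩ := (PySem.List.mem_enumerate_iff wpb 0 p).mp hpL
    exact ⟨j, hj, by simpa using hpb, by simpa using ha⟩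
  · rintro ⟨j, hj, hne, ha⟩
    exact List.mem_flatMap.mpr ⟨((j : Int), wpb[j]), List.mem_filter.mpr
      ⟨(PySem.List.mem_enumerate_iff wpb 0 _).mpr ⟨j, hj, by simp⟩, by simpa using hne⟩, ha⟩

theorem pv_mem_pvBooks (wpb : List (List String)) (w : String) (x : Int) :
    x ∈ pvBooks (PySem.List.enumerate wpb) w ↔
      ∃ j : Nat, ∃ _ : j < wpb.length, (x = (j : Int) ∧ w ∈ wpb[j]) := by
  constructor
  · intro h
    obtain ⟨p, hp, hpx⟩ := List.mem_map.mp h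
    obtain ⟨hpL, hpc⟩ := List.mem_filter.mp hp
    obtain ⟨j, hj, rfl⟩ := (PySem.List.mem_enumerate_iff wpb 0 p).mp hpL
    exact ⟨j, hj, by simpa using hpx.symm, by simpa using hpc⟩
  · rintro ⟨j, hj, rfl, hw⟩
    exact List.mem_map.mpr ⟨((j : Int), wpb[j]), List.mem_filter.mpr
      ⟨(PySem.List.mem_enumerate_iff wpb 0 _).mpr ⟨j, hj, by simp⟩, by simpa using hw⟩, rfl⟩

theorem pv_main (wpb : List (List String)) (ci : Int)
    (hpre : PySem.Raise.InRange wpb.length ci) :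
    get_unique_words wpb ci = get_unique_words_alt wpb ci := by
  cases hg : PySem.List.pyGet? wpb ci with
  | none => exact absurd hpre ((PySem.List.pyGet?_eq_none_iff wpb ci).mp hg)
  | some c =>
    have hrange : -(wpb.length : Int) ≤ ci ∧ ci < wpb.length := by
      simpa [PySem.Raise.InRange] using hpre
    rw [pv_a_eq wpb ci c hg, pv_alt_eq wpb ci c hg]
    by_cases hci : 0 ≤ ci
    · -- ci is a genuine nonnegative index
      have hkn : ci.toNat < wpb.length := by omega
      set k := ci.toNat with hk
      have hck : ci = (k : Int) := by omega
      have hc : c = wpb[k] := by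
        rw [PySem.List.pyGet?_of_nonneg wpb hci] at hg
        obtain ⟨_, h⟩ := List.getElem?_eq_some_iff.mp hg
        exact h.symm
      set R : String → Bool := fun w =>
        decide (w ∈ wpb[k]'hkn ∧ ∀ j : Nat, (hj : j < wpb.length) → j ≠ k → w ∉ wpb[j]) with hR
      trans ((PySem.Set.ofList c).filter R)
      · apply List.filter_congr
        intro w hw
        have hwc : w ∈ c := (PySem.Set.mem_ofList _ _).mp hw
        by_cases hwo : w ∈ ((PySem.List.enumerate wpb).filter
            (fun p => p.1 != ci)).flatMap (fun p => p.2)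
        · have h1 : (PySem.Set.ofList (((PySem.List.enumerate wpb).filter
              (fun p => p.1 != ci)).flatMap (fun p => p.2))).contains w = true :=
            (PySem.Set.contains_iff _ _).mpr ((PySem.Set.mem_ofList _ _).mpr hwo)
          obtain ⟨j, hj, hne, hwj⟩ := (pv_mem_others wpb ci w).mp hwo
          simp only [h1, Bool.not_true]
          symm
          rw [hR, decide_eq_false_iff_not]
          rintro ⟨-, hall⟩
          exact hall j hj (by omega) hwj
        · have h1 : (PySem.Set.ofList (((PySem.List.enumerate wpb).filter
              (fun p => p.1 != ci)).flatMap (fun p => p.2))).contains w = false := by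
            cases hcc : (PySem.Set.ofList (((PySem.List.enumerate wpb).filter
                (fun p => p.1 != ci)).flatMap (fun p => p.2))).contains w
            · rfl
            · exact absurd ((PySem.Set.mem_ofList _ _).mp
                ((PySem.Set.contains_iff _ _).mp hcc)) hwo
          simp only [h1, Bool.not_false]
          symm
          rw [hR, decide_eq_true_eq]
          refine ⟨hc ▸ hwc, fun j hj hjk hwj => ?_⟩
          exact hwo ((pv_mem_others wpb ci w).mpr ⟨j, hj, by omega, hwj⟩)
      trans ((PySem.Set.ofList wpb.flatten).filter R)
      · have hflat3 : wpb.flatten =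
            (wpb.take k).flatten ++ (wpb[k]'hkn ++ (wpb.drop (k + 1)).flatten) := by
          conv_lhs => rw [← List.take_append_drop k wpb, List.drop_eq_getElem_cons hkn]
          rw [List.flatten_append, List.flatten_cons]
        have hRpre : ∀ a ∈ (wpb.take k).flatten, R a = false := by
          intro a ha
          obtain ⟨l, hl, hal⟩ := List.mem_flatten.mp ha
          obtain ⟨m, hm, rfl⟩ := List.mem_iff_getElem.mp hl
          obtain ⟨hmk, hmn⟩ : m < k ∧ m < wpb.length := by
            simpa [List.length_take] using hm
          have ham : a ∈ wpb[m] := by simpa [List.getElem_take] using hal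
          rw [hR, decide_eq_false_iff_not]
          rintro ⟨-, hall⟩
          exact hall m hmn (by omega) ham
        have hRsuf : ∀ a ∈ (wpb.drop (k + 1)).flatten, R a = false := by
          intro a ha
          obtain ⟨l, hl, hal⟩ := List.mem_flatten.mp ha
          obtain ⟨m, hm, rfl⟩ := List.mem_iff_getElem.mp hl
          have hmn : k + 1 + m < wpb.length := by
            have := hm
            simp [List.length_drop] at this
            omega
          have ham : a ∈ wpb[k + 1 + m] := by simpa [List.getElem_drop] using hal
          rw [hR, decide_eq_false_iff_not]
          rintro ⟨-, hall⟩
          exact hall (k + 1 + m) hmn (by omega) ham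
        rw [hflat3, pv_filter_ofList_append_left _ _ R hRpre,
          pv_filter_ofList_append_right _ _ R hRsuf, hc]
      · apply List.filter_congr
        intro w hw
        cases hRw : R w with
        | false =>
          rw [hR, decide_eq_false_iff_not] at hRw
          cases hP : PySem.Set.equal (PySem.Set.ofList (pvBooks (PySem.List.enumerate wpb) w))
              (PySem.Set.ofList [ci])
          · rfl
          · exfalso
            have hiff := (PySem.Set.equal_iff _ _).mp hP
            apply hRw
            constructor
            · have hci' : ci ∈ PySem.Set.ofList (pvBooks (PySem.List.enumerate wpb) w) :=
                (hiff ci).mpr ((PySem.Set.mem_ofList _ _).mpr (List.mem_singleton.mpr rfl))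
              obtain ⟨j, hj, hcij, hwj⟩ :=
                (pv_mem_pvBooks wpb w ci).mp ((PySem.Set.mem_ofList _ _).mp hci')
              have : j = k := by omega
              exact this ▸ hwj
            · intro j hj hjk hwj
              have hjmem : (j : Int) ∈ PySem.Set.ofList (pvBooks (PySem.List.enumerate wpb) w) :=
                (PySem.Set.mem_ofList _ _).mpr
                  ((pv_mem_pvBooks wpb w _).mpr ⟨j, hj, rfl, hwj⟩)
              have : (j : Int) ∈ PySem.Set.ofList [ci] := (hiff _).mp hjmem
              have : (j : Int) = ci := List.mem_singleton.mp ((PySem.Set.mem_ofList _ _).mp this)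
              omega
        | true =>
          rw [hR, decide_eq_true_eq] at hRw
          obtain ⟨hwk, hall⟩ := hRw
          symm
          apply (PySem.Set.equal_iff _ _).mpr
          intro x
          rw [PySem.Set.mem_ofList, PySem.Set.mem_ofList, pv_mem_pvBooks, List.mem_singleton]
          constructor
          · rintro ⟨j, hj, rfl, hwj⟩
            have : j = k := by
              by_contra hjk
              exact hall j hj hjk hwj
            omega
          · rintro rfl
            exact ⟨k, hkn, hck, hwk⟩
    · -- negative index: both sides are empty
      have hflat : (PySem.List.enumerate wpb).flatMap (fun p => p.2) = wpb.flatten := by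
        simp [List.flatMap, PySem.List.map_snd_enumerate]
      have hfil : (PySem.List.enumerate wpb).filter (fun p => p.1 != ci) =
          PySem.List.enumerate wpb := by
        apply List.filter_eq_self.mpr
        intro p hp
        obtain ⟨j, hj, rfl⟩ := (PySem.List.mem_enumerate_iff wpb 0 p).mp hp
        simp only [bne_iff_ne, ne_eq]
        intro h
        omega
      have hcw : c ∈ wpb := PySem.List.mem_of_pyGet?_eq_some wpb hg
      have hAnil : (PySem.Set.ofList c).filter (fun w =>
          !((PySem.Set.ofList (((PySem.List.enumerate wpb).filter
              (fun p => p.1 != ci)).flatMap (fun p => p.2))).contains w)) = [] := by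
        apply List.filter_eq_nil_iff.mpr
        intro w hw
        have hwc : w ∈ c := (PySem.Set.mem_ofList _ _).mp hw
        have hwf : w ∈ ((PySem.List.enumerate wpb).filter
            (fun p => p.1 != ci)).flatMap (fun p => p.2) := by
          rw [hfil, hflat]
          exact List.mem_flatten.mpr ⟨c, hcw, hwc⟩
        intro hcontra
        have htrue : (PySem.Set.ofList (((PySem.List.enumerate wpb).filter
            (fun p => p.1 != ci)).flatMap (fun p => p.2))).contains w = true :=
          (PySem.Set.contains_iff _ _).mpr ((PySem.Set.mem_ofList _ _).mpr hwf)
        rw [htrue] at hcontra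
        simp at hcontra
      have hBnil : (PySem.Set.ofList wpb.flatten).filter
          (fun w => PySem.Set.equal (PySem.Set.ofList (pvBooks (PySem.List.enumerate wpb) w))
            (PySem.Set.ofList [ci])) = [] := by
        apply List.filter_eq_nil_iff.mpr
        intro w _ hP
        have hiff := (PySem.Set.equal_iff _ _).mp hP
        have hci' : ci ∈ PySem.Set.ofList (pvBooks (PySem.List.enumerate wpb) w) :=
          (hiff ci).mpr ((PySem.Set.mem_ofList _ _).mpr (List.mem_singleton.mpr rfl))
        obtain ⟨j, hj, hcij, -⟩ :=
          (pv_mem_pvBooks wpb w ci).mp ((PySem.Set.mem_ofList _ _).mp hci')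
        omega
      rw [hAnil, hBnil]

-- ===== VERDICT (by name: the statement is the Claim_ definition above) =====
theorem get_unique_words_spec : Claim_equal_get_unique_words := by
  intro words_per_book correct_answer_index _hdom hpre
  unfold Spec_get_unique_words
  exact pv_main words_per_book correct_answer_index hpre
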